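-- pv_equiv track=rewrite | github.com/divyanshu144/EPC | scripts/pipeline/policy.py | policy_period
-- ===== SOURCE A (Python) =====
-- _BOUNDARIES: list[tuple[int, int, str]] = [
--     (2008, 2012, "Pre-GreenDeal"),
--     (2013, 2015, "GreenDeal-ECO1"),
--     (2016, 2018, "ECO2"),
--     (2019, 2020, "MEES"),
--     (2021, 2025, "Post-Strategy"),
-- ]
--
-- def policy_period(year: int | float | None) -> str:
--     """Return the policy-period label for a given lodgement year.
--
--     Years outside 2008–2025, or non-numeric values, return 'Other'.
--     2015 is assigned to 'GreenDeal-ECO1' — see module docstring.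
--     """
--     if year is None:
--         return "Other"
--     try:
--         y = int(year)
--     except (TypeError, ValueError):
--         return "Other"
--
--     for lo, hi, label in _BOUNDARIES:
--         if lo <= y <= hi:
--             return label
--     return "Other"
-- ===== SOURCE B (Python) =====
-- _BOUNDARIES: list[tuple[int, int, str]] = [
--     (2008, 2012, "Pre-GreenDeal"),
--     (2013, 2015, "GreenDeal-ECO1"),
--     (2016, 2018, "ECO2"),
--     (2019, 2020, "MEES"),
--     (2021, 2025, "Post-Strategy"),
-- ]
--
-- _TABLE: dict[int, str] = {}
-- for _lo, _hi, _label in _BOUNDARIES: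
--     for _y in range(_lo, _hi + 1):
--         _TABLE[_y] = _label
--
-- def policy_period(year: int | float | None) -> str:
--     if year is None:
--         return "Other"
--     try:
--         y = int(year)
--     except (TypeError, ValueError):
--         return "Other"
--     return _TABLE.get(y, "Other")
-- ===== Notes on version B (the rewrite author's own statement) =====
-- stated objective: idiomatic
-- what changed: B precomputes a module-level dense year-to-label dict from the boundary ranges once at import time and replaces A's per-call linear scan over the boundary tuples with a single _TABLE.get(y, 'Other') lookup.
import Mathlib
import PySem

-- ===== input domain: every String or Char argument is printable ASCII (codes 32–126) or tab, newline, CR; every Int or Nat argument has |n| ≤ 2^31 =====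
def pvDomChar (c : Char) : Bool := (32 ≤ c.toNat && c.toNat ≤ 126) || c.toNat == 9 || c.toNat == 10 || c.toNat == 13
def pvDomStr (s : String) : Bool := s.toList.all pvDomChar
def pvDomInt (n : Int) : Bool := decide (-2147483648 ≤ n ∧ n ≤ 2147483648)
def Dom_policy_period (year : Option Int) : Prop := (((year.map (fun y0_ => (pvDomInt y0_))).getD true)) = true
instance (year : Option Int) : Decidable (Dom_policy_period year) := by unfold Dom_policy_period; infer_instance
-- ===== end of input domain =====

-- B replaces A's per-call scan over the boundary ranges by a module-level year→label table
-- built once, so each call is a single dict lookup (objective: idiomatic; no measured speed claim).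
-- A's try/except int(year) never fires on Option Int inputs, so both ports are total.

-- ===== PORT A =====
def pvBoundaries : List (Int × Int × String) :=
  [(2008, 2012, "Pre-GreenDeal"),
   (2013, 2015, "GreenDeal-ECO1"),
   (2016, 2018, "ECO2"),
   (2019, 2020, "MEES"),
   (2021, 2025, "Post-Strategy")]

-- A's 'for lo, hi, label in _BOUNDARIES: if lo <= y <= hi: return label' loop, with early return
def pvLoopA (y : Int) : List (Int × Int × String) → String
  | [] => "Other"
  | (lo, hi, label) :: rest => if lo ≤ y ∧ y ≤ hi then label else pvLoopA y rest

def policy_period (year : Option Int) : String :=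
  match year with
  | none => "Other"          -- if year is None: return "Other"
  | some y => pvLoopA y pvBoundaries   -- int(year) is the identity on Int; the except branch is unreachable

-- ===== PORT B =====
-- module-level table: for lo, hi, label in _BOUNDARIES: for y in range(lo, hi+1): _TABLE[y] = label
def pvTable : PySem.Dict Int String :=
  pvBoundaries.foldl
    (fun d (b : Int × Int × String) =>
      (PySem.List.pyRange b.1 (b.2.1 + 1) 1).foldl (fun d y => d.insert y b.2.2) d)
    PySem.Dict.empty

def policy_period_alt (year : Option Int) : String :=
  match year with
  | none => "Other"
  | some y => pvTable.getD y "Other"   -- _TABLE.get(y, "Other")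

-- ===== PRECONDITION & SPEC =====
def Spec_policy_period (year : Option Int) (out : String) : Prop := out = policy_period_alt year
instance (year : Option Int) (out : String) : Decidable (Spec_policy_period year out) := by unfold Spec_policy_period; infer_instance

-- ===== CLAIM (what is proved, stated in full; the proofs are below) =====
def Claim_equal_policy_period : Prop := ∀ (year : Option Int), Dom_policy_period year → Spec_policy_period year (policy_period year)

-- ===== LEMMAS AND PROOFS =====

-- getD on a literal dict whose keys all differ from y returns the default
theorem pvGetD_mk_of_not_mem (y : Int) (dflt : String) :
    ∀ items : List (Int × String), (∀ p ∈ items, p.1 ≠ y) →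
      (PySem.Dict.mk items).getD y dflt = dflt := by
  intro items
  induction items with
  | nil => intro _; rfl
  | cons p rest ih =>
      intro h
      simp only [PySem.Dict.getD]
      rw [PySem.Dict.get?_mk_cons, if_neg (by simpa using h p (List.mem_cons_self ..))]
      exact ih (fun q hq => h q (List.mem_cons_of_mem _ hq))

theorem pvTable_out (y : Int) (h : y < 2008 ∨ 2025 < y) : pvTable.getD y "Other" = "Other" := by
  have ht : pvTable.items.map (·.1) = PySem.List.pyRange 2008 2026 1 := by decide
  have hmk : pvTable = PySem.Dict.mk pvTable.items := rfl
  rw [hmk]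
  apply pvGetD_mk_of_not_mem
  intro p hp
  have hmem : p.1 ∈ pvTable.items.map (·.1) := List.mem_map.mpr ⟨p, hp, rfl⟩
  rw [ht] at hmem
  have := (PySem.List.mem_pyRange_one (a := 2008) (b := 2026)).mp hmem
  omega

-- ===== VERDICT (by name: the statement is the Claim_ definition above) =====
theorem policy_period_spec : Claim_equal_policy_period := by
  intro year _
  unfold Spec_policy_period
  match year with
  | none => rfl
  | some y =>
      by_cases h : 2008 ≤ y ∧ y ≤ 2025
      · obtain ⟨h1, h2⟩ := h
        interval_cases y <;> decide
      · show pvLoopA y pvBoundaries = pvTable.getD y "Other"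
        rw [pvTable_out y (by omega)]
        simp only [pvBoundaries, pvLoopA]
        rw [if_neg (by omega), if_neg (by omega), if_neg (by omega), if_neg (by omega),
            if_neg (by omega)]
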